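-- pv_equiv track=rewrite | github.com/HeartCentrix/tm_backend | workers/restore-worker/main.py | _entra_section_matches
-- ===== SOURCE A (Python) =====
-- from typing import Dict, List, Any, Optional
--
-- def _entra_section_matches(file_label: str, ui_sections: List[str]) -> bool:
--     """True when a section's output file_label falls under one of
--     the top-level UI sections the user selected."""
--     ui = {s.lower() for s in ui_sections}
--     groups = {
--         "users": {"users"},
--         "groups": {"groups"},
--         "roles": {"roles"},
--         "applications": {"applications", "service_principals"},
--         "security": {
--             "conditional_access_policies", "auth_contexts",
--             "auth_strengths", "named_locations", "security_defaults",
--             "risky_users", "security_alerts",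
--         },
--         "adminunits": {"admin_units"},
--         "intune": {"intune_devices", "intune_compliance", "intune_configuration"},
--         "audit": {"audit_logs", "sign_in_logs"},
--     }
--     for top in ui:
--         if file_label in groups.get(top, set()):
--             return True
--     return False
-- ===== SOURCE B (Python) =====
-- from typing import List
--
-- # Inverted index: each output file label -> its single top-level UI group.
-- _LABEL_TO_GROUP = {
--     "users": "users",
--     "groups": "groups",
--     "roles": "roles",
--     "applications": "applications",
--     "service_principals": "applications",
--     "conditional_access_policies": "security",
--     "auth_contexts": "security",
--     "auth_strengths": "security",
--     "named_locations": "security",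
--     "security_defaults": "security",
--     "risky_users": "security",
--     "security_alerts": "security",
--     "admin_units": "adminunits",
--     "intune_devices": "intune",
--     "intune_compliance": "intune",
--     "intune_configuration": "intune",
--     "audit_logs": "audit",
--     "sign_in_logs": "audit",
-- }
--
-- def _entra_section_matches(file_label: str, ui_sections: List[str]) -> bool:
--     """True when a section's output file_label falls under one of
--     the top-level UI sections the user selected."""
--     return _LABEL_TO_GROUP.get(file_label) in {s.lower() for s in ui_sections}
-- ===== Notes on version B (the rewrite author's own statement) =====
-- stated objective: simpler
-- what changed: A loops over each selected section and scans that group's label set for file_label; B inverts the fixed groups table once into a label-to-group index, does one lookup of file_label, and tests whether the owning group is in the lowercased selection.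
import Mathlib
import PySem

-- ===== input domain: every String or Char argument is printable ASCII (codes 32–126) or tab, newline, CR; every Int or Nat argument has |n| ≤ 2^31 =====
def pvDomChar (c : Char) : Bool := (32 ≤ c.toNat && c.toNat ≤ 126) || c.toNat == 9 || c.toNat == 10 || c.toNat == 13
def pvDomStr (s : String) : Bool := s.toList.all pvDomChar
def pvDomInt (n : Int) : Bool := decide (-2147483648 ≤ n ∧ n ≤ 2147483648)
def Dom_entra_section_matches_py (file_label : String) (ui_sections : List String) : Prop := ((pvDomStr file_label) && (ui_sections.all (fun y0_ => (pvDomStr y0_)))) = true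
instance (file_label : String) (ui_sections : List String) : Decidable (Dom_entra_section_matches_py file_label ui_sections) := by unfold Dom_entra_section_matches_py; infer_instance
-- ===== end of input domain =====

-- B replaces A's loop over the selected sections (scanning each group's label set) by a
-- precomputed inverted label→group table and a single lookup; objective: simpler.

-- ===== PORT A =====
-- the literal `groups` dict of A
def groupsA : PySem.Dict String (PySem.Set String) := PySem.Dict.mk
  [ ("users", PySem.Set.ofList ["users"])
  , ("groups", PySem.Set.ofList ["groups"])
  , ("roles", PySem.Set.ofList ["roles"])
  , ("applications", PySem.Set.ofList ["applications", "service_principals"])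
  , ("security", PySem.Set.ofList ["conditional_access_policies", "auth_contexts",
      "auth_strengths", "named_locations", "security_defaults",
      "risky_users", "security_alerts"])
  , ("adminunits", PySem.Set.ofList ["admin_units"])
  , ("intune", PySem.Set.ofList ["intune_devices", "intune_compliance", "intune_configuration"])
  , ("audit", PySem.Set.ofList ["audit_logs", "sign_in_logs"]) ]

-- `for top in ui: if file_label in …: return True` / `return False` is `any`
-- (order-independent, so set iteration order does not matter)
def entra_section_matches_py (file_label : String) (ui_sections : List String) : Bool :=
  let ui : PySem.Set String := PySem.Set.ofList (ui_sections.map PySem.Str.lower)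
  ui.any (fun top => PySem.Set.contains (PySem.Dict.getD groupsA top PySem.Set.empty) file_label)

-- ===== PORT B =====
-- B's literal inverted table _LABEL_TO_GROUP
def labelToGroup : PySem.Dict String String := PySem.Dict.mk
  [ ("users", "users")
  , ("groups", "groups")
  , ("roles", "roles")
  , ("applications", "applications")
  , ("service_principals", "applications")
  , ("conditional_access_policies", "security")
  , ("auth_contexts", "security")
  , ("auth_strengths", "security")
  , ("named_locations", "security")
  , ("security_defaults", "security")
  , ("risky_users", "security")
  , ("security_alerts", "security")
  , ("admin_units", "adminunits")
  , ("intune_devices", "intune")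
  , ("intune_compliance", "intune")
  , ("intune_configuration", "intune")
  , ("audit_logs", "audit")
  , ("sign_in_logs", "audit") ]

-- `_LABEL_TO_GROUP.get(file_label) in {s.lower() for s in ui_sections}`
-- (None is never a member of a set of strings, hence the `none => false` arm)
def entra_section_matches_py_alt (file_label : String) (ui_sections : List String) : Bool :=
  match PySem.Dict.get? labelToGroup file_label with
  | some g => PySem.Set.contains (PySem.Set.ofList (ui_sections.map PySem.Str.lower)) g
  | none => false

-- ===== PRECONDITION & SPEC =====
def Spec_entra_section_matches_py (file_label : String) (ui_sections : List String) (out : Bool) : Prop := out = entra_section_matches_py_alt file_label ui_sections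
instance (file_label : String) (ui_sections : List String) (out : Bool) : Decidable (Spec_entra_section_matches_py file_label ui_sections out) := by unfold Spec_entra_section_matches_py; infer_instance

-- ===== CLAIM (what is proved, stated in full; the proofs are below) =====
def Claim_equal_entra_section_matches_py : Prop := ∀ (file_label : String) (ui_sections : List String), Dom_entra_section_matches_py file_label ui_sections → Spec_entra_section_matches_py file_label ui_sections (entra_section_matches_py file_label ui_sections)

-- ===== LEMMAS AND PROOFS =====

-- Bridge between the two tables: `file_label ∈ groups[top]` iff B's inverted table maps
-- `file_label` to `top`.
set_option maxHeartbeats 4000000 in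
theorem mem_groupsA_iff (top label : String) :
    PySem.Set.contains (PySem.Dict.getD groupsA top PySem.Set.empty) label
      = true ↔ PySem.Dict.get? labelToGroup label = some top := by
  simp only [groupsA, labelToGroup, PySem.Dict.getD, PySem.Dict.get?,
    PySem.Set.contains, PySem.Set.ofList, PySem.Set.empty, List.find?_cons]
  by_cases h1 : top = "users" <;> by_cases h2 : top = "groups" <;> by_cases h3 : top = "roles" <;>
    by_cases h4 : top = "applications" <;> by_cases h5 : top = "security" <;>
    by_cases h6 : top = "adminunits" <;> by_cases h7 : top = "intune" <;> by_cases h8 : top = "audit" <;>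
    simp_all <;> (repeat' split) <;> simp_all <;>
    (first | (subst_vars; simp) | simp_all [eq_comm])

-- A's `any` over the deduplicated selection equals B's single-lookup-then-membership.
theorem main_case (file_label : String) (L : List String) :
    (PySem.Set.ofList L).any
      (fun top => PySem.Set.contains (PySem.Dict.getD groupsA top PySem.Set.empty) file_label)
    = (match PySem.Dict.get? labelToGroup file_label with
       | some g => PySem.Set.contains (PySem.Set.ofList L) g
       | none => false) := by
  have hcont : ∀ (x : String),
      PySem.Set.contains (PySem.Set.ofList L) x = true ↔ x ∈ L := by
    intro x
    simp [PySem.Set.contains, PySem.Set.mem_ofList]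
  cases hg : PySem.Dict.get? labelToGroup file_label with
  | none =>
      rw [List.any_eq_false]
      intro top _ h
      exact absurd ((mem_groupsA_iff top file_label).mp h) (by simp [hg])
  | some g =>
      apply Bool.eq_iff_iff.mpr
      constructor
      · intro h
        rcases List.any_eq_true.mp h with ⟨top, hmem, hP⟩
        rw [mem_groupsA_iff, hg] at hP
        cases Option.some.inj hP
        exact (hcont _).mpr ((PySem.Set.mem_ofList L _).mp hmem)
      · intro h
        apply List.any_eq_true.mpr
        refine ⟨g, (PySem.Set.mem_ofList L g).mpr ((hcont g).mp h), ?_⟩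
        rw [mem_groupsA_iff, hg]

-- ===== VERDICT (by name: the statement is the Claim_ definition above) =====
theorem entra_section_matches_py_spec : Claim_equal_entra_section_matches_py := by
  intro file_label ui_sections _
  unfold Spec_entra_section_matches_py entra_section_matches_py entra_section_matches_py_alt
  exact main_case file_label (ui_sections.map PySem.Str.lower)
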